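-- pv_equiv track=rewrite | github.com/rsumner33/urh | src/urh/signalprocessing/encoding.py | code_lsb_first
-- ===== SOURCE A (Python) =====
-- def code_lsb_first(decoding, inpt):
--     output = inpt.copy()
--     errors = len(inpt) % 8
--
--     # Change Byteorder to LSB first <-> LSB last
--     i = 0
--     while i < len(output) - 7:
--         output[i + 0], output[i + 1], output[i + 2], output[i + 3], output[i + 4], output[i + 5], output[i + 6], \
--         output[i + 7] = \
--             output[i + 7], output[i + 6], output[i + 5], output[i + 4], output[i + 3], output[i + 2], output[i + 1], \
--             output[i + 0]
--         i += 8
--     return output, errors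
-- ===== SOURCE B (Python) =====
-- def code_lsb_first(decoding, inpt):
--     errors = len(inpt) % 8
--     full = len(inpt) - errors
--     output = inpt.copy()
--     for j in range(full):
--         output[j] = inpt[(j // 8) * 8 + 7 - (j % 8)]
--     return output, errors
-- ===== Notes on version B (the rewrite author's own statement) =====
-- stated objective: alternative
-- what changed: Replaces A's in-place 8-way tuple swap per block (while loop stepping by 8, reading the partially-mutated output) with a single flat loop that fills each output position j directly from the untouched input at the computed source index (j//8)*8+7-j%8.
import Mathlib
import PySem

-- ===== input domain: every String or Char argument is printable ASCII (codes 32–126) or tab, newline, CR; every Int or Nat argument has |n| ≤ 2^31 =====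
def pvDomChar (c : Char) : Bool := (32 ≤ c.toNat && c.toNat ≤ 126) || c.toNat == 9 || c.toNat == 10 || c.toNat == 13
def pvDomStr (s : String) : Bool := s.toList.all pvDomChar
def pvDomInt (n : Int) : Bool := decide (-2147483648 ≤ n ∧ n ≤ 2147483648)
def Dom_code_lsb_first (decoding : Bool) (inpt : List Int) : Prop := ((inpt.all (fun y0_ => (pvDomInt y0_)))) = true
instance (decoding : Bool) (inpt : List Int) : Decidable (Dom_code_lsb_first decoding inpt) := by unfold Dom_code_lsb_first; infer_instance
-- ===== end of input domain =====

-- B replaces A's in-place 8-way tuple swap per block with a flat loop filling each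
-- output position directly from its computed source index in the untouched input
-- (return-value equivalence; A mutates no caller-visible state: it copies first).


-- ===== PORT A =====
-- A's while loop: 'while i < len(output) - 7' (Python ints) is equivalent to i + 7 < len over ℕ.
-- All eight reads output[i+k] are in range (i+7 < len), so getD 0 is exact here.
def code_lsb_first_loop (output : List Int) (i : Nat) : List Int :=
  if _h : i + 7 < output.length then
    let a0 := output.getD (i + 0) 0
    let a1 := output.getD (i + 1) 0
    let a2 := output.getD (i + 2) 0
    let a3 := output.getD (i + 3) 0
    let a4 := output.getD (i + 4) 0
    let a5 := output.getD (i + 5) 0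
    let a6 := output.getD (i + 6) 0
    let a7 := output.getD (i + 7) 0
    code_lsb_first_loop
      ((((((((output.set (i + 0) a7).set (i + 1) a6).set (i + 2) a5).set (i + 3) a4).set
          (i + 4) a3).set (i + 5) a2).set (i + 6) a1).set (i + 7) a0)
      (i + 8)
  else output
termination_by output.length - i
decreasing_by simp_all [List.length_set]; omega

def code_lsb_first (decoding : Bool) (inpt : List Int) : List Int × Int :=
  (code_lsb_first_loop inpt 0, (inpt.length : Int) % 8)

-- ===== PORT B =====
-- range(full) with full = len - len%8 ≥ 0 is ported as List.range full; all indices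
-- j and (j/8)*8+7-j%8 are nonnegative and < len, so Nat arithmetic and getD 0 are exact.
def code_lsb_first_alt (decoding : Bool) (inpt : List Int) : List Int × Int :=
  let errors := inpt.length % 8
  let full := inpt.length - errors
  let output := (List.range full).foldl
    (fun out j => out.set j (inpt.getD ((j / 8) * 8 + 7 - j % 8) 0)) inpt
  (output, (errors : Int))

-- ===== PRECONDITION & SPEC =====
def Spec_code_lsb_first (decoding : Bool) (inpt : List Int) (out : List Int × Int) : Prop := out = code_lsb_first_alt decoding inpt
instance (decoding : Bool) (inpt : List Int) (out : List Int × Int) : Decidable (Spec_code_lsb_first decoding inpt out) := by unfold Spec_code_lsb_first; infer_instance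

-- ===== CLAIM (what is proved, stated in full; the proofs are below) =====
def Claim_equal_code_lsb_first : Prop := ∀ (decoding : Bool) (inpt : List Int), Dom_code_lsb_first decoding inpt → Spec_code_lsb_first decoding inpt (code_lsb_first decoding inpt)

-- ===== LEMMAS AND PROOFS =====

theorem getD_set_int (l : List Int) (i j : Nat) (v : Int) :
    (l.set i v).getD j 0 = if i = j ∧ j < l.length then v else l.getD j 0 := by
  simp [List.getD, List.getElem?_set]
  split_ifs with h1 h2 h3 <;> simp_all

theorem length_loopA (l : List Int) (i : Nat) :
    (code_lsb_first_loop l i).length = l.length := by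
  fun_induction code_lsb_first_loop l i with
  | case1 l i h a0 a1 a2 a3 a4 a5 a6 a7 ih => simpa [List.length_set] using ih
  | case2 => rfl

set_option maxHeartbeats 1000000 in
theorem loopA_getD (l : List Int) (i k : Nat) :
    (code_lsb_first_loop l i).getD k 0 =
      if i ≤ k ∧ k < i + ((l.length - i) / 8) * 8 then
        l.getD (i + (((k - i) / 8) * 8 + 7 - (k - i) % 8)) 0
      else l.getD k 0 := by
  fun_induction code_lsb_first_loop l i with
  | case1 l i h a0 a1 a2 a3 a4 a5 a6 a7 ih =>
    rw [ih]
    simp only [a0, a1, a2, a3, a4, a5, a6, a7] at *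
    simp only [getD_set_int, List.length_set]
    have hlen : l.length ≥ i + 8 := by omega
    by_cases hk1 : k < i
    · -- untouched, below the block
      have c1 : ¬ (i + 8 ≤ k ∧ k < i + 8 + ((l.length - (i + 8)) / 8) * 8) := by omega
      have c2 : ¬ (i ≤ k ∧ k < i + ((l.length - i) / 8) * 8) := by omega
      simp only [if_neg c1, if_neg c2]
      split_ifs <;> first | rfl | omega
    · by_cases hk2 : k < i + 8
      · -- inside the current block
        have c1 : ¬ (i + 8 ≤ k ∧ k < i + 8 + ((l.length - (i + 8)) / 8) * 8) := by omega
        have c2 : i ≤ k ∧ k < i + ((l.length - i) / 8) * 8 := by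
          constructor
          · omega
          · have : (l.length - i) / 8 ≥ 1 := by omega
            omega
        simp only [if_neg c1, if_pos c2]
        have hidx : i + (((k - i) / 8) * 8 + 7 - (k - i) % 8) = i + 7 - (k - i) := by omega
        rw [hidx]
        -- k is one of i..i+7: resolve the nested ifs
        have h0 : i + 0 < l.length := by omega
        have h1 : i + 1 < l.length := by omega
        have h2 : i + 2 < l.length := by omega
        have h3 : i + 3 < l.length := by omega
        have h4 : i + 4 < l.length := by omega
        have h5 : i + 5 < l.length := by omega
        have h6 : i + 6 < l.length := by omega
        have h7 : i + 7 < l.length := by omega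
        have hcase : k = i + 0 ∨ k = i + 1 ∨ k = i + 2 ∨ k = i + 3 ∨ k = i + 4 ∨ k = i + 5 ∨ k = i + 6 ∨ k = i + 7 := by omega
        rcases hcase with rfl | rfl | rfl | rfl | rfl | rfl | rfl | rfl <;> simp_all
      · -- above the block: indices k and the source index both ≥ i+8
        have hsrc : i + 8 ≤ i + 8 + (((k - (i + 8)) / 8) * 8 + 7 - (k - (i + 8)) % 8) := by omega
        by_cases c1 : i + 8 ≤ k ∧ k < i + 8 + ((l.length - (i + 8)) / 8) * 8
        · have c2 : i ≤ k ∧ k < i + ((l.length - i) / 8) * 8 := by omega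
          simp only [if_pos c1, if_pos c2]
          have hidx : i + 8 + (((k - (i + 8)) / 8) * 8 + 7 - (k - (i + 8)) % 8)
              = i + (((k - i) / 8) * 8 + 7 - (k - i) % 8) := by omega
          rw [hidx]
          split_ifs <;> first | rfl | omega
        · have c2 : ¬ (i ≤ k ∧ k < i + ((l.length - i) / 8) * 8) := by omega
          simp only [if_neg c1, if_neg c2]
          split_ifs <;> first | rfl | omega
  | case2 l i h =>
    have : ¬ (i ≤ k ∧ k < i + ((l.length - i) / 8) * 8) := by
      by_cases hli : i ≤ l.length
      · have : (l.length - i) / 8 = 0 := by omega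
        omega
      · have : l.length - i = 0 := by omega
        simp_all
    simp [this]

def fillB (inpt : List Int) (full : Nat) : List Int :=
  (List.range full).foldl (fun out j => out.set j (inpt.getD ((j / 8) * 8 + 7 - j % 8) 0)) inpt

theorem length_fillB (inpt : List Int) (full : Nat) :
    (fillB inpt full).length = inpt.length := by
  induction full with
  | zero => rfl
  | succ m ih =>
    simp [fillB, List.range_succ, List.foldl_append] at *
    simpa [List.length_set] using ih

theorem fillB_getD (inpt : List Int) (full k : Nat) (hfull : full ≤ inpt.length) :
    (fillB inpt full).getD k 0 =
      if k < full then inpt.getD ((k / 8) * 8 + 7 - k % 8) 0 else inpt.getD k 0 := by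
  induction full with
  | zero => simp [fillB]
  | succ m ih =>
    have hm : m ≤ inpt.length := by omega
    have hlen := length_fillB inpt m
    simp only [fillB, List.range_succ, List.foldl_append, List.foldl_cons, List.foldl_nil]
    rw [show ((List.range m).foldl
        (fun out j => out.set j (inpt.getD ((j / 8) * 8 + 7 - j % 8) 0)) inpt) = fillB inpt m
      from rfl]
    rw [getD_set_int, hlen, ih hm]
    split_ifs <;> first | rfl | omega | (congr 1; omega)

theorem code_lsb_first_eq (decoding : Bool) (inpt : List Int) :
    code_lsb_first decoding inpt = code_lsb_first_alt decoding inpt := by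
  have hB : code_lsb_first_alt decoding inpt
      = (fillB inpt (inpt.length - inpt.length % 8), ((inpt.length % 8 : Nat) : Int)) := rfl
  unfold code_lsb_first
  rw [hB]
  refine Prod.ext ?_ (by omega)
  simp only
  have hlenA := length_loopA inpt 0
  have hlenB := length_fillB inpt (inpt.length - inpt.length % 8)
  apply List.ext_getElem (by rw [hlenA, hlenB])
  intro k hk1 hk2
  have hkl : k < inpt.length := by rwa [hlenA] at hk1
  rw [← List.getD_eq_getElem _ 0 hk1, ← List.getD_eq_getElem _ 0 hk2]
  rw [loopA_getD]
  rw [fillB_getD inpt _ k (by omega)]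
  have hc : (0 ≤ k ∧ k < 0 + ((inpt.length - 0) / 8) * 8) ↔ (k < inpt.length - inpt.length % 8) := by
    omega
  by_cases h : k < inpt.length - inpt.length % 8
  · rw [if_pos (hc.mpr h), if_pos h]
    congr 1
    omega
  · rw [if_neg (fun hx => h (hc.mp hx)), if_neg h]

-- ===== VERDICT (by name: the statement is the Claim_ definition above) =====
theorem code_lsb_first_spec : Claim_equal_code_lsb_first := by
  intro decoding inpt _
  exact code_lsb_first_eq decoding inpt
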